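-- pv_equiv track=rewrite | github.com/jaiden06/PasswordVerification | websitePassword.py | containsLower
-- ===== SOURCE A (Python) =====
-- def containsDigit(passwordList):
--     """Accepts a list of passwords and returns a sorted list of passwords where those passwords containing digits are accepted and the rest are rejected."""
--     AcceptedList = []
--     RejectedList = []
--     containsDigit = False
--     for password in passwordList:
--         passwordContainsDigit = False
--         for individualCharacter in password:
--             if individualCharacter.isdigit():
--                 passwordContainsDigit = True
--         if passwordContainsDigit: # vs. if containsDigit == True:      containsDigit (True / False)
--             AcceptedList.append(password)
--         else: # elif containsDigit == False
--             RejectedList.append(password)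
--     AcceptedRejectedList = [RejectedList, AcceptedList]
--     return AcceptedRejectedList
--
-- def passLength(passwordList):
--     x = containsDigit(passwordList)
--     AcceptedList = x[1]
--     RejectedList = x[0]
--     for position, password in enumerate(AcceptedList):
--         if len(password) <= 5 or len(password) >= 13:
--             AcceptedList.pop(position)
--             AcceptedList.insert(position, None)
--             RejectedList.append(password)
--     AcceptedRejectedList = [RejectedList, AcceptedList]
--     return AcceptedRejectedList
--
-- def containsSpecialCharacters(passwordList): #creates the new function(problem area)
--     x = passLength(passwordList)
--     AcceptedList = x[1]
--     RejectedList = x[0]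
--     for password in AcceptedList:
--         if password == None:
--             continue
--         SymbolInPass = False
--         if password.find("#") + password.find("$") + password.find("@") != -3:
--             SymbolInPass = True
--         if SymbolInPass == False:
--             x = AcceptedList.index(password)
--             AcceptedList.pop(x)
--             AcceptedList.insert(x, None)
--             RejectedList.append(password)
--     AcceptedRejectedList = [RejectedList, AcceptedList]
--     return AcceptedRejectedList
--
-- def containsUpper(passwordList):
--     x = containsSpecialCharacters(passwordList)
--     AcceptedList = x[1]
--     RejectedList = x[0]
--     for password in AcceptedList:
--         if password == None:
--             continue
--
--         containsUpperLetter = False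
--         for individualCharacter in password:
--             if individualCharacter.isupper() == True:
--                 containsUpperLetter = True
--
--         if containsUpperLetter != True:
--             x = AcceptedList.index(password)
--             AcceptedList.pop(x)
--             AcceptedList.insert(x, None)
--             RejectedList.append(password)
--
--     AcceptedRejectedList = [RejectedList, AcceptedList]
--     return AcceptedRejectedList
--
-- def containsLower(passwordList):
--     x = containsUpper(passwordList)
--     AcceptedList = x[1]
--     RejectedList = x[0]
--     for password in AcceptedList:
--         if password == None:
--             continue
--
--         containsLowerLetter = False
--         for individualCharacters in password:
--             if individualCharacters.islower() == True:
--                 containsLowerLetter = True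
--
--         if containsLowerLetter != True:
--             x = AcceptedList.index(password)
--             AcceptedList.pop(x)
--             AcceptedList.insert(x, None)
--             RejectedList.append(password)
--     AcceptedRejectedList = [RejectedList, AcceptedList]
--     return AcceptedRejectedList
-- ===== SOURCE B (Python) =====
-- def containsLower(passwordList):
--     """Single pass: each password goes to its first failing rule's bucket (or accepted);
--     buckets are concatenated digit+length+symbol+upper+lower for the rejected list."""
--     digit_r, len_r, sym_r, up_r, low_r = [], [], [], [], []
--     accepted = []
--     for p in passwordList:
--         if not any(c.isdigit() for c in p):
--             digit_r.append(p)
--             continue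
--         if len(p) <= 5 or len(p) >= 13:
--             len_r.append(p); accepted.append(None)
--         elif not any(c in '#$@' for c in p):
--             sym_r.append(p); accepted.append(None)
--         elif not any(c.isupper() for c in p):
--             up_r.append(p); accepted.append(None)
--         elif not any(c.islower() for c in p):
--             low_r.append(p); accepted.append(None)
--         else:
--             accepted.append(p)
--     return [digit_r + len_r + sym_r + up_r + low_r, accepted]
-- ===== Notes on version B (the rewrite author's own statement) =====
-- stated objective: simpler
-- what changed: A pipelines five functions, each re-scanning and mutating the accepted list with enumerate/list.index pop-insert surgery; B does one pass that sends each password to the bucket of its first failing rule (digit, length, symbol, upper, lower) and concatenates the buckets.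
import Mathlib
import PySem

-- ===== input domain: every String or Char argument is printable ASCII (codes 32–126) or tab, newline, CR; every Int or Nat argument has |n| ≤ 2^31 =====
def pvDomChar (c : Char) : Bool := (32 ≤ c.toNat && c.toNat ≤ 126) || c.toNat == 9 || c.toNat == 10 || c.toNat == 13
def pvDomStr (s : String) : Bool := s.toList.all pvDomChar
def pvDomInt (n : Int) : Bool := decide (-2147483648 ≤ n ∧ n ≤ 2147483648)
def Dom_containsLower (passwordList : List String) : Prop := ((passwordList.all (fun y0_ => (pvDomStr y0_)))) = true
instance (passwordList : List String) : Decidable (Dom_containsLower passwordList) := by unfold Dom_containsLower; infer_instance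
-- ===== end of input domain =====

-- B replaces A's five-pass pipeline (digit filter, then three re-scans of the accepted list with
-- list.index-based None replacement) by one pass that sends each password to its first failing
-- rule's bucket and concatenates the buckets; objective: simpler.

-- ===== PORT A =====
-- the `for individualCharacter in password: if ….isdigit(): flag = True` loops, kept as folds
def pvDigitFlag (password : String) : Bool :=
  password.toList.foldl (fun b c => if PySem.Chars.isdigit c then true else b) false
def pvUpperFlag (password : String) : Bool :=
  password.toList.foldl (fun b c => if PySem.Chars.isupper c then true else b) false
def pvLowerFlag (password : String) : Bool :=
  password.toList.foldl (fun b c => if PySem.Chars.islower c then true else b) false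

def pvContainsDigit (passwordList : List String) : List String × List String :=
  passwordList.foldl
    (fun st password =>
      if pvDigitFlag password then (st.1, st.2 ++ [password])
      else (st.1 ++ [password], st.2))
    ([], [])

-- `for position, password in enumerate(AcceptedList)` with `pop(position); insert(position, None)`
-- (= set position to None).  The loop mutates only the position it is visiting, so folding over the
-- enumeration of the initial list is exact.
def pvPassLengthLoop : List (Int × Option String) → List String × List (Option String) → List String × List (Option String)
  | [], st => st
  | (position, password) :: rest, st =>
    match password with
    | some pw =>
        if PySem.Str.len pw ≤ 5 ∨ 13 ≤ PySem.Str.len pw then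
          pvPassLengthLoop rest (st.1 ++ [pw], st.2.set position.toNat none)
        else pvPassLengthLoop rest st
    | none => pvPassLengthLoop rest st   -- unreachable: after pvContainsDigit the list holds strings only

def pvPassLength (passwordList : List String) : List String × List (Option String) :=
  let x := pvContainsDigit passwordList
  let acc0 : List (Option String) := x.2.map some
  pvPassLengthLoop (PySem.List.enumerate acc0) (x.1, acc0)

-- SymbolInPass = (password.find("#") + password.find("$") + password.find("@") != -3)
def pvSymbolInPass (password : String) : Bool :=
  PySem.Str.find password "#" + PySem.Str.find password "$" + PySem.Str.find password "@" != -3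

-- shared body of A's three copy-pasted stage loops (`for password in AcceptedList: if password == None:
-- continue; … if <stage test fails>: x = AcceptedList.index(password); pop(x); insert(x, None) (= set x
-- to None); RejectedList.append(password)`), parameterized by the stage's failing test; the loop blanks
-- only already-visited positions, so folding over the stage's initial list is exact.
def pvRejectLoop (fails : String → Bool) : List (Option String) → List String × List (Option String) → List String × List (Option String)
  | [], st => st
  | password? :: rest, st =>
    match password? with
    | none => pvRejectLoop fails rest st
    | some password =>
      if fails password then
        match PySem.List.index? st.2 (some password) with
        | some x => pvRejectLoop fails rest (st.1 ++ [password], st.2.set x none)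
        | none => pvRejectLoop fails rest st   -- Python's .index would raise ValueError; unreachable
      else pvRejectLoop fails rest st

def pvContainsSpecialCharacters (passwordList : List String) : List String × List (Option String) :=
  let x := pvPassLength passwordList
  pvRejectLoop (fun password => !pvSymbolInPass password) x.2 (x.1, x.2)

def pvContainsUpper (passwordList : List String) : List String × List (Option String) :=
  let x := pvContainsSpecialCharacters passwordList
  pvRejectLoop (fun password => !pvUpperFlag password) x.2 (x.1, x.2)

def containsLower (passwordList : List String) : List (List (Option String)) :=
  let x := pvContainsUpper passwordList
  let y := pvRejectLoop (fun password => !pvLowerFlag password) x.2 (x.1, x.2)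
  [y.1.map some, y.2]

-- ===== PORT B =====
structure PvBuckets where
  digitR : List String
  lenR   : List String
  symR   : List String
  upR    : List String
  lowR   : List String
  acc    : List (Option String)
deriving Repr, DecidableEq

-- `any(f(c) for c in p)`
def pvAnyChar (f : Char → Bool) (p : String) : Bool := p.toList.any f

def pvBStep (st : PvBuckets) (p : String) : PvBuckets :=
  if !pvAnyChar PySem.Chars.isdigit p then
    { st with digitR := st.digitR ++ [p] }
  else if PySem.Str.len p ≤ 5 ∨ 13 ≤ PySem.Str.len p then
    { st with lenR := st.lenR ++ [p], acc := st.acc ++ [none] }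
  else if !pvAnyChar (fun c => "#$@".toList.contains c) p then   -- `c in '#$@'`
    { st with symR := st.symR ++ [p], acc := st.acc ++ [none] }
  else if !pvAnyChar PySem.Chars.isupper p then
    { st with upR := st.upR ++ [p], acc := st.acc ++ [none] }
  else if !pvAnyChar PySem.Chars.islower p then
    { st with lowR := st.lowR ++ [p], acc := st.acc ++ [none] }
  else
    { st with acc := st.acc ++ [some p] }

def containsLower_alt (passwordList : List String) : List (List (Option String)) :=
  let st := passwordList.foldl pvBStep ⟨[], [], [], [], [], []⟩
  [(st.digitR ++ st.lenR ++ st.symR ++ st.upR ++ st.lowR).map some, st.acc]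

-- ===== PRECONDITION & SPEC =====
def Spec_containsLower (passwordList : List String) (out : List (List (Option String))) : Prop := out = containsLower_alt passwordList
instance (passwordList : List String) (out : List (List (Option String))) : Decidable (Spec_containsLower passwordList out) := by unfold Spec_containsLower; infer_instance

-- ===== CLAIM (what is proved, stated in full; the proofs are below) =====
def Claim_equal_containsLower : Prop := ∀ (passwordList : List String), Dom_containsLower passwordList → Spec_containsLower passwordList (containsLower passwordList)

-- ===== LEMMAS AND PROOFS =====

-- canonical per-password predicates
def pvHasDigit (p : String) : Bool := pvAnyChar PySem.Chars.isdigit p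
def pvBadLen (p : String) : Bool := decide (PySem.Str.len p ≤ 5 ∨ 13 ≤ PySem.Str.len p)
def pvHasSym (p : String) : Bool := pvAnyChar (fun c => "#$@".toList.contains c) p
def pvHasUp (p : String) : Bool := pvAnyChar PySem.Chars.isupper p
def pvHasLow (p : String) : Bool := pvAnyChar PySem.Chars.islower p

def pvFd (p : String) : Bool := !pvHasDigit p
def pvFl (p : String) : Bool := pvHasDigit p && pvBadLen p
def pvFs (p : String) : Bool := pvHasDigit p && !pvBadLen p && !pvHasSym p
def pvFu (p : String) : Bool := pvHasDigit p && !pvBadLen p && pvHasSym p && !pvHasUp p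
def pvFlo (p : String) : Bool := pvHasDigit p && !pvBadLen p && pvHasSym p && pvHasUp p && !pvHasLow p
def pvCls (p : String) : Option (Option String) :=
  if pvHasDigit p then
    some (if pvBadLen p || !pvHasSym p || !pvHasUp p || !pvHasLow p then none else some p)
  else none

-- the flag-setting character loops compute `any`
theorem pvFlagFold (f : Char → Bool) (l : List Char) (b : Bool) :
    l.foldl (fun b c => if f c then true else b) b = (b || l.any f) := by
  induction l generalizing b with
  | nil => simp
  | cons c t ih =>
    simp only [List.foldl_cons, List.any_cons, ih]
    cases f c <;> simp

theorem pvDigitFlag_eq (p : String) : pvDigitFlag p = pvHasDigit p := by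
  unfold pvDigitFlag pvHasDigit pvAnyChar; rw [pvFlagFold]; simp
theorem pvUpperFlag_eq (p : String) : pvUpperFlag p = pvHasUp p := by
  unfold pvUpperFlag pvHasUp pvAnyChar; rw [pvFlagFold]; simp
theorem pvLowerFlag_eq (p : String) : pvLowerFlag p = pvHasLow p := by
  unfold pvLowerFlag pvHasLow pvAnyChar; rw [pvFlagFold]; simp

-- the find-sum symbol test is the membership test
theorem pvFindHash (p : String) (c : Char) (s : String) (hs : s.toList = [c]) :
    PySem.Str.find p s = -1 ↔ c ∉ p.toList := by
  rw [PySem.Str.find_eq_neg_one_iff, hs, List.singleton_infix_iff]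

theorem pvSymbolInPass_eq (p : String) : pvSymbolInPass p = pvHasSym p := by
  have b1 : -1 ≤ PySem.Str.find p "#" := by rw [PySem.Str.find_eq]; exact PySem.Chars.neg_one_le_find _ _
  have b2 : -1 ≤ PySem.Str.find p "$" := by rw [PySem.Str.find_eq]; exact PySem.Chars.neg_one_le_find _ _
  have b3 : -1 ≤ PySem.Str.find p "@" := by rw [PySem.Str.find_eq]; exact PySem.Chars.neg_one_le_find _ _
  have i1 : PySem.Str.find p "#" = -1 ↔ '#' ∉ p.toList := pvFindHash p '#' "#" rfl
  have i2 : PySem.Str.find p "$" = -1 ↔ '$' ∉ p.toList := pvFindHash p '$' "$" rfl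
  have i3 : PySem.Str.find p "@" = -1 ↔ '@' ∉ p.toList := pvFindHash p '@' "@" rfl
  rw [Bool.eq_iff_iff]
  simp only [pvSymbolInPass, pvHasSym, pvAnyChar, bne_iff_ne, ne_eq, List.any_eq_true]
  have hiff : (∃ c ∈ p.toList, ("#$@".toList.contains c) = true) ↔
      ('#' ∈ p.toList ∨ '$' ∈ p.toList ∨ '@' ∈ p.toList) := by
    constructor
    · rintro ⟨c, hm, hc⟩
      have hc' : c = '#' ∨ c = '$' ∨ c = '@' := by
        have : c ∈ "#$@".toList := by simpa using hc
        simpa using this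
      rcases hc' with rfl | rfl | rfl <;> tauto
    · rintro (h | h | h)
      · exact ⟨'#', h, by decide⟩
      · exact ⟨'$', h, by decide⟩
      · exact ⟨'@', h, by decide⟩
  rw [hiff]
  constructor
  · intro h
    by_contra hc
    push Not at hc
    rw [i1.2 hc.1, i2.2 hc.2.1, i3.2 hc.2.2] at h
    omega
  · rintro (h | h | h) hsum
    · have : ¬ PySem.Str.find p "#" = -1 := fun he => (i1.1 he) h
      omega
    · have : ¬ PySem.Str.find p "$" = -1 := fun he => (i2.1 he) h
      omega
    · have : ¬ PySem.Str.find p "@" = -1 := fun he => (i3.1 he) h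
      omega

-- stage 1 closed form
theorem pvContainsDigitFold (pl : List String) (r a : List String) :
    pl.foldl (fun st password =>
      if pvDigitFlag password then (st.1, st.2 ++ [password])
      else (st.1 ++ [password], st.2)) (r, a) =
      (r ++ pl.filter pvFd, a ++ pl.filter pvHasDigit) := by
  induction pl generalizing r a with
  | nil => simp
  | cons p t ih =>
    simp only [pvDigitFlag_eq] at ih ⊢
    simp only [List.foldl_cons, List.filter_cons, pvFd]
    by_cases h : pvHasDigit p <;> simp [h, ih]

theorem pvContainsDigit_eq (pl : List String) :
    pvContainsDigit pl = (pl.filter pvFd, pl.filter pvHasDigit) := by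
  simpa using pvContainsDigitFold pl [] []

-- stage 2 closed form
theorem pvPassLengthLoop_eq (l : List String) (k : Nat) (done : List (Option String)) (rej : List String)
    (hk : done.length = k) :
    pvPassLengthLoop (PySem.List.enumerate (l.map some) (k : Int)) (rej, done ++ l.map some) =
      (rej ++ l.filter pvBadLen, done ++ l.map (fun p => if pvBadLen p then none else some p)) := by
  induction l generalizing done rej k with
  | nil => simp [pvPassLengthLoop]
  | cons p t ih =>
    rw [List.map_cons, PySem.List.enumerate_cons]
    simp only [pvPassLengthLoop]
    have htn : ((k : Int)).toNat = done.length := by simp [hk]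
    have hcast : ((k : Int)) + 1 = ((k + 1 : Nat) : Int) := by push_cast; ring
    by_cases h : PySem.Str.len p ≤ 5 ∨ 13 ≤ PySem.Str.len p
    · have hset : (done ++ some p :: t.map some).set done.length none = done ++ none :: t.map some := by
        simp
      have hrec := ih (k + 1) (done ++ [none]) (rej ++ [p]) (by simp [hk])
      rw [if_pos h]
      simp only [htn, hset, hcast]
      have hb : pvBadLen p = true := by simpa [pvBadLen] using h
      simpa [List.append_assoc, List.filter_cons, hb] using hrec
    · have hrec := ih (k + 1) (done ++ [some p]) rej (by simp [hk])
      rw [if_neg h]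
      simp only [hcast]
      have hb : pvBadLen p = false := by simpa [pvBadLen] using h
      simpa [List.append_assoc, List.filter_cons, hb] using hrec

theorem pvPassLength_eq (pl : List String) :
    pvPassLength pl = ((pl.filter pvFd) ++ (pl.filter pvHasDigit).filter pvBadLen,
      (pl.filter pvHasDigit).map (fun p => if pvBadLen p then none else some p)) := by
  unfold pvPassLength
  rw [pvContainsDigit_eq]
  have := pvPassLengthLoop_eq (pl.filter pvHasDigit) 0 [] (pl.filter pvFd) rfl
  simpa using this

-- generic stage-loop closed form
theorem pvIndexAppend (done t : List (Option String)) (p : String) (h : some p ∉ done) :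
    PySem.List.index? (done ++ some p :: t) (some p) = some done.length := by
  rw [PySem.List.index?_eq_some_iff]
  exact ⟨done, t, rfl, rfl, h⟩

theorem pvRejectLoop_eq (fails : String → Bool) (l done : List (Option String)) (rej : List String)
    (hdone : ∀ o ∈ done, ∀ q, o = some q → fails q = false) :
    pvRejectLoop fails l (rej, done ++ l) =
      (rej ++ l.filterMap (fun o => o.bind (fun p => if fails p then some p else none)),
       done ++ l.map (fun o => o.bind (fun p => if fails p then none else some p))) := by
  induction l generalizing done rej with
  | nil => simp [pvRejectLoop]
  | cons o t ih =>
    cases o with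
    | none =>
      have h2 : ∀ o ∈ done ++ [none], ∀ q, o = some q → fails q = false := by
        intro o ho q hq
        rcases List.mem_append.1 ho with h | h
        · exact hdone o h q hq
        · simp only [List.mem_singleton] at h; subst h; simp at hq
      have := ih (done ++ [none]) rej h2
      simp only [pvRejectLoop]
      simpa [List.append_assoc] using this
    | some p =>
      by_cases hf : fails p
      · have hnm : some p ∉ done := by
          intro hm
          have := hdone _ hm p rfl
          simp [hf] at this
        have hidx := pvIndexAppend done t p hnm
        have hset : (done ++ some p :: t).set done.length none = done ++ none :: t := by simp
        have h2 : ∀ o ∈ done ++ [none], ∀ q, o = some q → fails q = false := by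
          intro o ho q hq
          rcases List.mem_append.1 ho with h | h
          · exact hdone o h q hq
          · simp only [List.mem_singleton] at h; subst h; simp at hq
        have hrec := ih (done ++ [none]) (rej ++ [p]) h2
        simp only [pvRejectLoop, hf, if_true, hidx, hset]
        simpa [List.append_assoc, hf] using hrec
      · have h2 : ∀ o ∈ done ++ [some p], ∀ q, o = some q → fails q = false := by
          intro o ho q hq
          rcases List.mem_append.1 ho with h | h
          · exact hdone o h q hq
          · simp only [List.mem_singleton] at h; subst h
            simp only [Option.some.injEq] at hq; subst hq
            simpa using hf
        have hrec := ih (done ++ [some p]) rej h2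
        simp only [pvRejectLoop, hf]
        simpa [List.append_assoc, hf] using hrec

-- B closed form
theorem pvBFold (pl : List String) (st : PvBuckets) :
    pl.foldl pvBStep st =
      ⟨st.digitR ++ pl.filter pvFd, st.lenR ++ pl.filter pvFl, st.symR ++ pl.filter pvFs,
       st.upR ++ pl.filter pvFu, st.lowR ++ pl.filter pvFlo, st.acc ++ pl.filterMap pvCls⟩ := by
  induction pl generalizing st with
  | nil => simp
  | cons p t ih =>
    simp only [List.foldl_cons, ih, List.filter_cons, List.filterMap_cons]
    by_cases h1 : pvAnyChar PySem.Chars.isdigit p <;>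
      by_cases h2 : p.length ≤ 5 ∨ 13 ≤ p.length <;>
      by_cases h3 : pvAnyChar (fun c => decide (c = '#') || (decide (c = '$') || decide (c = '@'))) p <;>
      by_cases h4 : pvAnyChar PySem.Chars.isupper p <;>
      by_cases h5 : pvAnyChar PySem.Chars.islower p <;>
      simp [pvBStep, pvFd, pvFl, pvFs, pvFu, pvFlo, pvCls, pvHasDigit, pvHasSym, pvHasUp,
        pvHasLow, pvBadLen, h1, h2, h3, h4, h5, List.append_assoc]

-- shapes of the stage results
def pvKill (q : String → Bool) (o : Option String) : Option String :=
  o.bind (fun p => if q p then none else some p)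
def pvTake (q : String → Bool) (o : Option String) : Option String :=
  o.bind (fun p => if q p then some p else none)

theorem pvStage (fails : String → Bool) (rej : List String) (l : List (Option String)) :
    pvRejectLoop fails l (rej, l) = (rej ++ l.filterMap (pvTake fails), l.map (pvKill fails)) := by
  have := pvRejectLoop_eq fails l [] rej (by simp)
  simpa [pvTake, pvKill] using this

theorem pvChainFilter (l : List String) (d q : String → Bool) (F : String → Option String)
    (h : ∀ x, d x = true → F x = if q x then some x else none)
    (h2 : ∀ x, q x = true → d x = true) :
    (l.filter d).filterMap F = l.filter q := by
  induction l with
  | nil => rfl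
  | cons a t ih =>
    by_cases hd : d a
    · by_cases hq : q a <;> simp [hd, hq, h a hd, ih]
    · have hq : q a = false := by
        cases hqa : q a
        · rfl
        · exact absurd (h2 a hqa) (by simp [hd])
      simp [hd, hq, ih]

theorem pvChainMap (l : List String) (d : String → Bool) (G : Option String → Option String)
    (E : String → Option String) (C : String → Option (Option String))
    (h1 : ∀ x, d x = true → C x = some (G (E x))) (h2 : ∀ x, d x = false → C x = none) :
    ((l.filter d).map E).map G = l.filterMap C := by
  rw [List.map_map]
  induction l with
  | nil => rfl
  | cons a t ih =>
    cases hd : d a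
    · simp [hd, h2 a hd, ih]
    · simp [hd, h1 a hd, ih, Function.comp]

theorem pvRej2 (pl : List String) :
    (pl.filter pvHasDigit).filter pvBadLen = pl.filter pvFl := by
  rw [List.filter_filter]
  exact List.filter_congr (fun x _ => by simp [pvFl, Bool.and_comm])

theorem pvRej3 (pl : List String) :
    ((pl.filter pvHasDigit).map (fun p => if pvBadLen p then none else some p)).filterMap
        (pvTake (fun p => !pvHasSym p)) = pl.filter pvFs := by
  rw [List.filterMap_map]
  apply pvChainFilter
  · intro x hd
    simp only [Function.comp, pvTake, pvFs, hd]
    by_cases h2 : pvBadLen x <;> by_cases h3 : pvHasSym x <;> simp [h2, h3]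
  · intro x hq
    simp [pvFs] at hq
    tauto

theorem pvRej4 (pl : List String) :
    (((pl.filter pvHasDigit).map (fun p => if pvBadLen p then none else some p)).map
        (pvKill (fun p => !pvHasSym p))).filterMap (pvTake (fun p => !pvHasUp p)) = pl.filter pvFu := by
  rw [List.map_map, List.filterMap_map]
  apply pvChainFilter
  · intro x hd
    simp only [Function.comp, pvKill, pvTake, pvFu, hd]
    by_cases h2 : pvBadLen x <;> by_cases h3 : pvHasSym x <;> by_cases h4 : pvHasUp x <;>
      simp [h2, h3, h4]
  · intro x hq
    simp [pvFu] at hq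
    tauto

theorem pvRej5 (pl : List String) :
    ((((pl.filter pvHasDigit).map (fun p => if pvBadLen p then none else some p)).map
        (pvKill (fun p => !pvHasSym p))).map (pvKill (fun p => !pvHasUp p))).filterMap
        (pvTake (fun p => !pvHasLow p)) = pl.filter pvFlo := by
  rw [List.map_map, List.map_map, List.filterMap_map]
  apply pvChainFilter
  · intro x hd
    simp only [Function.comp, pvKill, pvTake, pvFlo, hd]
    by_cases h2 : pvBadLen x <;> by_cases h3 : pvHasSym x <;> by_cases h4 : pvHasUp x <;>
      by_cases h5 : pvHasLow x <;> simp [h2, h3, h4, h5]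
  · intro x hq
    simp [pvFlo] at hq
    tauto

theorem pvAcc5 (pl : List String) :
    ((((pl.filter pvHasDigit).map (fun p => if pvBadLen p then none else some p)).map
        (pvKill (fun p => !pvHasSym p))).map (pvKill (fun p => !pvHasUp p))).map
        (pvKill (fun p => !pvHasLow p)) = pl.filterMap pvCls := by
  rw [List.map_map, List.map_map]
  apply pvChainMap
  · intro x hd
    simp only [Function.comp, pvKill, pvCls, hd]
    by_cases h2 : pvBadLen x <;> by_cases h3 : pvHasSym x <;> by_cases h4 : pvHasUp x <;>
      by_cases h5 : pvHasLow x <;> simp [h2, h3, h4, h5]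
  · intro x hd
    simp [pvCls, hd]

-- ===== VERDICT (by name: the statement is the Claim_ definition above) =====
theorem containsLower_spec : Claim_equal_containsLower := by
  intro pl _
  unfold Spec_containsLower
  unfold containsLower pvContainsUpper pvContainsSpecialCharacters
  rw [pvPassLength_eq]
  simp only [pvSymbolInPass_eq, pvUpperFlag_eq, pvLowerFlag_eq]
  simp only [pvStage]
  unfold containsLower_alt
  rw [pvBFold]
  simp only [List.nil_append]
  rw [pvRej2, pvRej3, pvRej4, pvRej5, pvAcc5]
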